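-- pv_equiv track=rewrite | github.com/jdonnelly234/leetcode_solutions | easy/arrays + strings/2000_Reverse_Prefix_Of_Word.py | reverse_prefix_two_pointers
-- ===== SOURCE A (Python) =====
-- def reverse_prefix_two_pointers(word, ch):
--     char_index = word.find(ch)
--     if char_index == -1:
--         return word
--
--     word = list(word)  # Convert to list to allow in-place modification
--     left, right = 0, char_index
--
--     while left < right:
--         word[left], word[right] = word[right], word[left] # Tuple packing allows handy swapping (remember this)
--         left += 1
--         right -= 1
--
--     return ''.join(word)
-- ===== SOURCE B (Python) =====
-- def reverse_prefix_two_pointers(word, ch):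
--     i = word.find(ch)
--     if i == -1:
--         return word
--     return word[:i+1][::-1] + word[i+1:]
-- ===== Notes on version B (the rewrite author's own statement) =====
-- stated objective: idiomatic
-- what changed: Replaces the list conversion and in-place two-pointer swap loop with a single expression that reverses the inclusive prefix by slicing and concatenates the rest.
import Mathlib
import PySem

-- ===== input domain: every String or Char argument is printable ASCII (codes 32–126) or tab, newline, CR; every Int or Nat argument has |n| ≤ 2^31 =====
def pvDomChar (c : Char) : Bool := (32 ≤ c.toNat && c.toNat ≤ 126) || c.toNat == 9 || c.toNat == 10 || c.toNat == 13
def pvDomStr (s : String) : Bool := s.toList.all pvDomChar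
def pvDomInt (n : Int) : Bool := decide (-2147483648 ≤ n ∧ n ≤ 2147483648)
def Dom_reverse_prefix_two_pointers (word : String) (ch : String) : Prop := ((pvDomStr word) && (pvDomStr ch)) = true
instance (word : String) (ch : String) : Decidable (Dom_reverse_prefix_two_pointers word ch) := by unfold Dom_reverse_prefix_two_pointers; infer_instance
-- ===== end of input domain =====

-- B replaces A's list conversion and in-place two-pointer swap loop with a single
-- slice expression that reverses the inclusive prefix (idiomatic; same cost).
-- ===== PORT A =====
-- while left < right: swap word[left], word[right]; left += 1; right -= 1
-- (indices are always in range here, so getD's default is never read)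
def pvSwapLoop (cs : List Char) (l r : Nat) : List Char :=
  if _h : l < r then
    pvSwapLoop ((cs.set l (cs.getD r ' ')).set r (cs.getD l ' ')) (l + 1) (r - 1)
  else cs
termination_by r - l
decreasing_by omega

def reverse_prefix_two_pointers (word : String) (ch : String) : String :=
  let char_index := PySem.Str.find word ch
  if char_index = -1 then word
  else String.ofList (pvSwapLoop word.toList 0 char_index.toNat)

-- ===== PORT B =====
-- word[:i+1][::-1] + word[i+1:]  (the [::-1] slice? is never none for step -1)
def reverse_prefix_two_pointers_alt (word : String) (ch : String) : String :=
  let i := PySem.Str.find word ch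
  if i = -1 then word
  else
    String.ofList
      (((PySem.Chars.slice? (PySem.Chars.slice word.toList none (some (i + 1))) none none (-1)).getD [])
        ++ PySem.Chars.slice word.toList (some (i + 1)) none)

-- ===== PRECONDITION & SPEC =====
def Spec_reverse_prefix_two_pointers (word : String) (ch : String) (out : String) : Prop := out = reverse_prefix_two_pointers_alt word ch
instance (word : String) (ch : String) (out : String) : Decidable (Spec_reverse_prefix_two_pointers word ch out) := by unfold Spec_reverse_prefix_two_pointers; infer_instance

-- ===== CLAIM (what is proved, stated in full; the proofs are below) =====
def Claim_equal_reverse_prefix_two_pointers : Prop := ∀ (word : String) (ch : String), Dom_reverse_prefix_two_pointers word ch → Spec_reverse_prefix_two_pointers word ch (reverse_prefix_two_pointers word ch)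

-- ===== LEMMAS AND PROOFS =====
theorem pvSwapLoop_getElem? (cs : List Char) (l r : Nat)
    (hr : r < cs.length) (j : Nat) :
    (pvSwapLoop cs l r)[j]? = if l ≤ j ∧ j ≤ r then cs[l + r - j]? else cs[j]? := by
  induction cs, l, r using pvSwapLoop.induct with
  | case1 cs l r h ih =>
    rw [pvSwapLoop, dif_pos h]
    have hlen : ((cs.set l (cs.getD r ' ')).set r (cs.getD l ' ')).length = cs.length := by simp
    rw [ih (by omega)]
    have hgr : cs.getD r ' ' = cs[r] := List.getD_eq_getElem cs ' ' hr
    have hgl : cs.getD l ' ' = cs[l] := List.getD_eq_getElem cs ' ' (by omega)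
    by_cases h1 : l + 1 ≤ j ∧ j ≤ r - 1
    · rw [if_pos h1, if_pos (by omega)]
      have : l + 1 + (r - 1) - j = l + r - j := by omega
      rw [this]
      rw [List.getElem?_set, List.getElem?_set]
      have : ¬ r = l + r - j := by omega
      rw [if_neg this]
      have : ¬ l = l + r - j := by omega
      rw [if_neg this]
    · rw [if_neg h1]
      by_cases hj : j = l
      · rw [if_pos (by omega)]
        have e1 : l + r - j = r := by omega
        rw [e1, List.getElem?_set, List.getElem?_set]
        rw [if_neg (by omega), if_pos hj.symm, if_pos (by omega), hgr,
          List.getElem?_eq_getElem hr]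
      · by_cases hj2 : j = r
        · rw [if_pos (by omega)]
          have e1 : l + r - j = l := by omega
          rw [e1, List.getElem?_set, if_pos hj2.symm, List.length_set, if_pos (by omega), hgl,
            List.getElem?_eq_getElem (by omega)]
        · rw [if_neg (by omega), List.getElem?_set, List.getElem?_set,
            if_neg (fun hc => hj2 hc.symm), if_neg (fun hc => hj hc.symm)]
  | case2 cs l r h =>
    rw [pvSwapLoop, dif_neg h]
    by_cases h1 : l ≤ j ∧ j ≤ r
    · have : j = l ∧ j = r := by omega
      rw [if_pos h1]
      have : l + r - j = j := by omega
      rw [this]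
    · rw [if_neg h1]

theorem pvSwapLoop_zero (cs : List Char) (r : Nat) (hr : r < cs.length) :
    pvSwapLoop cs 0 r = (cs.take (r + 1)).reverse ++ cs.drop (r + 1) := by
  apply List.ext_getElem?
  intro j
  rw [pvSwapLoop_getElem? cs 0 r hr j]
  have hlt : (cs.take (r + 1)).length = r + 1 := by
    simp; omega
  by_cases hj : j ≤ r
  · rw [if_pos (by omega), List.getElem?_append_left (by simp [hlt]; omega)]
    rw [List.getElem?_reverse (by simp [hlt]; omega), hlt, List.getElem?_take_of_lt (by omega)]
    congr 1; omega
  · rw [if_neg (by omega), List.getElem?_append_right (by simp [hlt]; omega)]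
    rw [List.length_reverse, hlt, List.getElem?_drop]
    congr 1; omega

-- ===== VERDICT (by name: the statement is the Claim_ definition above) =====
theorem reverse_prefix_two_pointers_spec : Claim_equal_reverse_prefix_two_pointers := by
  intro word ch _hdom
  unfold Spec_reverse_prefix_two_pointers reverse_prefix_two_pointers
    reverse_prefix_two_pointers_alt
  by_cases h : PySem.Str.find word ch = -1
  · have h' : PySem.Chars.find word.toList ch.toList = -1 := by
      rw [← PySem.Str.find_eq]; exact h
    simp [h']
  · simp only [if_neg h]
    set i := PySem.Str.find word ch with hi
    have he : i = PySem.Chars.find word.toList ch.toList := by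
      rw [hi]; simp
    have hi0 : 0 ≤ i := by
      have := PySem.Chars.neg_one_le_find word.toList ch.toList
      omega
    have hile : i ≤ word.toList.length := by
      have := PySem.Chars.find_le_length word.toList ch.toList
      omega
    have htn : (i + 1).toNat = i.toNat + 1 := by omega
    rw [PySem.Chars.slice_eq_listSlice, PySem.Chars.slice_eq_listSlice,
      PySem.Chars.slice?_eq_listSlice?,
      PySem.List.slice_to _ (by omega : (0:Int) ≤ i + 1),
      PySem.List.slice_from _ (by omega : (0:Int) ≤ i + 1),
      PySem.List.slice?_none_none_neg_one, Option.getD_some, htn]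
    have hcase : i.toNat < word.toList.length ∨ word.toList = [] := by
      by_cases hch : ch.toList = []
      · rw [hch] at he
        rw [PySem.Chars.find_nil] at he
        rcases Nat.eq_zero_or_pos word.toList.length with h0 | hpos
        · right; exact List.eq_nil_of_length_eq_zero h0
        · left; omega
      · left
        have hfnd : (0:Int) ≤ PySem.Chars.find word.toList ch.toList := by omega
        have hspec := (PySem.Chars.find_spec hfnd).1
        rw [← he] at hspec
        have hlen := hspec.length_le
        have hchpos : 0 < ch.toList.length := List.length_pos_iff.mpr hch
        have hdrop : (word.toList.drop i.toNat).length = word.toList.length - i.toNat :=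
          List.length_drop
        omega
    rcases hcase with hlt | hnil
    · rw [pvSwapLoop_zero _ _ hlt]
    · have hz : i = 0 := by
        rw [hnil] at hile; simp at hile; omega
      rw [hz, hnil]
      simp [pvSwapLoop]
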